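-- pv_equiv track=rewrite | github.com/kuntaro0524/ZooRelated | calculate_mean_meastime.py | group_into_series
-- ===== SOURCE A (Python) =====
-- SERIES_GAP_THRESHOLD = 1200  # 20 minutes
--
-- def group_into_series(cps_dirs, threshold=SERIES_GAP_THRESHOLD):
--     series = []
--     current_series = []
--
--     for i, item in enumerate(cps_dirs):
--         if i == 0:
--             current_series.append(item)
--         else:
--             prev_time = cps_dirs[i - 1][1]
--             curr_time = item[1]
--             if curr_time - prev_time > threshold:
--                 series.append(current_series)
--                 current_series = [item]
--             else:
--                 current_series.append(item)
--
--     if current_series: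
--         series.append(current_series)
--
--     return series
-- ===== SOURCE B (Python) =====
-- SERIES_GAP_THRESHOLD = 1200  # 20 minutes
--
--
-- def group_into_series(cps_dirs, threshold=SERIES_GAP_THRESHOLD):
--     # Greedy chopping: repeatedly find the end of the first series (first gap
--     # strictly greater than threshold), slice it off, and continue on the rest.
--     series = []
--     rest = cps_dirs
--     while rest:
--         k = 1
--         while k < len(rest) and rest[k][1] - rest[k - 1][1] <= threshold:
--             k += 1
--         series.append(rest[:k])
--         rest = rest[k:]
--     return series
-- ===== Notes on version B (the rewrite author's own statement) =====
-- stated objective: alternative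
-- what changed: Replaced the single enumerate-driven accumulator loop (carrying current_series and a trailing flush) with a greedy two-pointer chopper that repeatedly locates the end of the first series and slices it off, needing no post-loop flush.
import Mathlib
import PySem

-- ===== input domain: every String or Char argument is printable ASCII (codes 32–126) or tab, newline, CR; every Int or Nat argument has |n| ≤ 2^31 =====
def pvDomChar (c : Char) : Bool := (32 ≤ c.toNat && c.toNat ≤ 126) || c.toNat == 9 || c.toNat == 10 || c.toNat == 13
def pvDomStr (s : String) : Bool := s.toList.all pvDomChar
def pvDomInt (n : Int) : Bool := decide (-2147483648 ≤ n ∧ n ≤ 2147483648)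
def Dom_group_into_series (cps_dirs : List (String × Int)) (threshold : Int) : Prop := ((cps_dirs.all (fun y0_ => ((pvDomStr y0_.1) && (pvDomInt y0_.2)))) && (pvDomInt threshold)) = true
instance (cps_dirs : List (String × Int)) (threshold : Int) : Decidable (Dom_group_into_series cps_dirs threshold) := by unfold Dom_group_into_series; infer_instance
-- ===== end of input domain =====

-- B replaces A's single enumerate-driven accumulator loop by a greedy two-pointer chopper
-- (find the end of the first series, slice it off, repeat); alternative decomposition, same cost.


-- ===== PORT A =====
-- the for-loop over enumerate(cps_dirs), carrying (series, current_series)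
def aLoop (full : List (String × Int)) (threshold : Int) :
    List (Int × (String × Int)) → List (List (String × Int)) → List (String × Int) →
    List (List (String × Int)) × List (String × Int)
  | [], series, current => (series, current)
  | (i, item) :: rest, series, current =>
    if i = 0 then aLoop full threshold rest series (current ++ [item])
    else
      -- cps_dirs[i - 1][1]: the index is always in range when this line runs, so pyGet? is some
      let prev_time := ((PySem.List.pyGet? full (i - 1)).getD ("", 0)).2
      let curr_time := item.2
      if curr_time - prev_time > threshold then
        aLoop full threshold rest (series ++ [current]) [item]
      else
        aLoop full threshold rest series (current ++ [item])

def group_into_series (cps_dirs : List (String × Int)) (threshold : Int) : List (List (String × Int)) :=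
  let st := aLoop cps_dirs threshold (PySem.List.enumerate cps_dirs 0) [] []
  if st.2 ≠ [] then st.1 ++ [st.2] else st.1

-- ===== PORT B =====
-- inner while-loop: first k ≥ start with k = len(rest) or a gap > threshold between rest[k-1], rest[k];
-- both indices are in range whenever read, so List.getD is exact here
def findK (rest : List (String × Int)) (threshold : Int) (k : Nat) : Nat :=
  if h : k < rest.length ∧ (rest.getD k ("", 0)).2 - (rest.getD (k - 1) ("", 0)).2 ≤ threshold then
    findK rest threshold (k + 1)
  else k
termination_by rest.length - k
decreasing_by obtain ⟨h1, -⟩ := h; omega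

theorem findK_ge (rest : List (String × Int)) (threshold : Int) (k : Nat) :
    k ≤ findK rest threshold k := by
  fun_induction findK <;> omega

-- outer while-loop: rest[:k] / rest[k:] with 0 ≤ k are exactly take/drop
def bLoop (threshold : Int) (rest : List (String × Int)) (series : List (List (String × Int))) :
    List (List (String × Int)) :=
  match rest with
  | [] => series
  | x :: xs =>
    let k := findK (x :: xs) threshold 1
    bLoop threshold ((x :: xs).drop k) (series ++ [(x :: xs).take k])
termination_by rest.length
decreasing_by
  have := findK_ge (x :: xs) threshold 1
  simp only [List.length_drop, List.length_cons]
  omega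

def group_into_series_alt (cps_dirs : List (String × Int)) (threshold : Int) : List (List (String × Int)) :=
  bLoop threshold cps_dirs []

-- ===== PRECONDITION & SPEC =====
def Spec_group_into_series (cps_dirs : List (String × Int)) (threshold : Int) (out : List (List (String × Int))) : Prop := out = group_into_series_alt cps_dirs threshold
instance (cps_dirs : List (String × Int)) (threshold : Int) (out : List (List (String × Int))) : Decidable (Spec_group_into_series cps_dirs threshold out) := by unfold Spec_group_into_series; infer_instance

-- ===== CLAIM (what is proved, stated in full; the proofs are below) =====
def Claim_equal_group_into_series : Prop := ∀ (cps_dirs : List (String × Int)) (threshold : Int), Dom_group_into_series cps_dirs threshold → Spec_group_into_series cps_dirs threshold (group_into_series cps_dirs threshold)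

-- ===== LEMMAS AND PROOFS =====

-- canonical form both ports are reduced to: chop off the first series, recurse
def chop (threshold : Int) (prev : String × Int) :
    List (String × Int) → List (String × Int) × List (String × Int)
  | [] => ([], [])
  | x :: xs =>
    if x.2 - prev.2 > threshold then ([], x :: xs)
    else (x :: (chop threshold x xs).1, (chop threshold x xs).2)

theorem chop_len (threshold : Int) (prev : String × Int) (xs : List (String × Int)) :
    (chop threshold prev xs).2.length ≤ xs.length := by
  induction xs generalizing prev with
  | nil => simp [chop]
  | cons x xs ih =>
    simp only [chop]
    split
    · simp
    · exact le_trans (ih x) (by simp)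

theorem chop_append (threshold : Int) (prev : String × Int) (xs : List (String × Int)) :
    (chop threshold prev xs).1 ++ (chop threshold prev xs).2 = xs := by
  induction xs generalizing prev with
  | nil => simp [chop]
  | cons x xs ih =>
    simp only [chop]
    split
    · simp
    · simp [ih x]

def canon (threshold : Int) : List (String × Int) → List (List (String × Int))
  | [] => []
  | x :: xs => (x :: (chop threshold x xs).1) :: canon threshold (chop threshold x xs).2
termination_by l => l.length
decreasing_by have := chop_len threshold x xs; simp; omega

-- ---- A side ----

-- A's loop after the first element, with the index machinery stripped
def aR (threshold : Int) (prev : String × Int) :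
    List (String × Int) → List (List (String × Int)) → List (String × Int) →
    List (List (String × Int)) × List (String × Int)
  | [], s, c => (s, c)
  | x :: xs, s, c =>
    if x.2 - prev.2 > threshold then aR threshold x xs (s ++ [c]) [x]
    else aR threshold x xs s (c ++ [x])

theorem aLoop_eq_aR (threshold : Int) (rest : List (String × Int)) :
    ∀ (pre : List (String × Int)) (prev : String × Int) (s : List (List (String × Int)))
      (c : List (String × Int)),
      aLoop (pre ++ prev :: rest) threshold
        (PySem.List.enumerate rest ((pre.length : Int) + 1)) s c = aR threshold prev rest s c := by
  induction rest with
  | nil => intro pre prev s c; simp [PySem.List.enumerate_nil, aLoop, aR]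
  | cons x xs ih =>
    intro pre prev s c
    rw [PySem.List.enumerate_cons]
    have hne : ¬ ((pre.length : Int) + 1 = 0) := by omega
    have hget : PySem.List.pyGet? (pre ++ prev :: x :: xs) ((pre.length : Int) + 1 - 1)
        = some prev := by
      have h1 : (pre.length : Int) + 1 - 1 = ((pre.length : Nat) : Int) := by omega
      rw [h1]
      simp
    have happ : pre ++ prev :: x :: xs = (pre ++ [prev]) ++ x :: xs := by simp
    have hlen : ((pre ++ [prev]).length : Int) + 1 = (pre.length : Int) + 1 + 1 := by
      simp only [List.length_append, List.length_cons, List.length_nil]; omega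
    simp only [aLoop, hne, if_false, hget, Option.getD_some, aR]
    split
    · rw [happ, ← hlen, ih (pre ++ [prev]) x]
    · rw [happ, ← hlen, ih (pre ++ [prev]) x]

-- A's trailing flush, as a direct recursion
def aK (threshold : Int) (prev : String × Int) :
    List (String × Int) → List (String × Int) → List (List (String × Int))
  | [], c => [c]
  | x :: xs, c =>
    if x.2 - prev.2 > threshold then c :: aK threshold x xs [x]
    else aK threshold x xs (c ++ [x])

theorem aR_cur_ne (threshold : Int) (xs : List (String × Int)) :
    ∀ (prev : String × Int) s c, c ≠ [] → (aR threshold prev xs s c).2 ≠ [] := by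
  induction xs with
  | nil => intro prev s c hc; simpa [aR] using hc
  | cons x xs ih =>
    intro prev s c hc
    simp only [aR]
    split
    · exact ih x _ [x] (by simp)
    · exact ih x _ (c ++ [x]) (by simp)

theorem aR_flush (threshold : Int) (xs : List (String × Int)) :
    ∀ (prev : String × Int) s c,
      (aR threshold prev xs s c).1 ++ [(aR threshold prev xs s c).2] = s ++ aK threshold prev xs c := by
  induction xs with
  | nil => intro prev s c; simp [aR, aK]
  | cons x xs ih =>
    intro prev s c
    simp only [aR, aK]
    split
    · rw [ih x (s ++ [c]) [x]]; simp
    · rw [ih x s (c ++ [x])]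

theorem aK_canon (threshold : Int) (xs : List (String × Int)) :
    ∀ (prev : String × Int) c,
      aK threshold prev xs c
        = (c ++ (chop threshold prev xs).1) :: canon threshold (chop threshold prev xs).2 := by
  induction xs with
  | nil => intro prev c; simp [aK, chop, canon]
  | cons x xs ih =>
    intro prev c
    simp only [aK, chop]
    split
    · rw [ih x [x]]
      simp [canon]
    · rw [ih x (c ++ [x])]
      simp

theorem a_eq_canon (cps_dirs : List (String × Int)) (threshold : Int) :
    group_into_series cps_dirs threshold = canon threshold cps_dirs := by
  cases cps_dirs with
  | nil => simp [group_into_series, PySem.List.enumerate_nil, aLoop, canon]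
  | cons x xs =>
    unfold group_into_series
    rw [PySem.List.enumerate_cons]
    have h0 : aLoop (x :: xs) threshold ((0, x) :: PySem.List.enumerate xs (0 + 1)) [] []
        = aR threshold x xs [] [x] := by
      simp only [aLoop, List.nil_append]
      have := aLoop_eq_aR threshold xs [] x [] [x]
      simpa using this
    simp only [h0]
    have hne := aR_cur_ne threshold xs x [] [x] (by simp)
    rw [if_pos hne, aR_flush, aK_canon]
    simp [canon]

-- ---- B side ----

theorem findK_chop (threshold : Int) (xs : List (String × Int)) :
    ∀ (pre : List (String × Int)) (prev : String × Int),
      findK (pre ++ prev :: xs) threshold (pre.length + 1)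
        = pre.length + 1 + (chop threshold prev xs).1.length := by
  induction xs with
  | nil =>
    intro pre prev
    rw [findK, dif_neg (by simp)]
    simp [chop]
  | cons y ys ih =>
    intro pre prev
    have hgety : (pre ++ prev :: y :: ys).getD (pre.length + 1) ("", 0) = y := by
      rw [List.getD_eq_getElem?_getD, List.getElem?_append_right (by omega)]
      simp
    have hgetp : (pre ++ prev :: y :: ys).getD (pre.length + 1 - 1) ("", 0) = prev := by
      rw [List.getD_eq_getElem?_getD]
      simp
    have hlt : pre.length + 1 < (pre ++ prev :: y :: ys).length := by
      simp only [List.length_append, List.length_cons]; omega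
    rw [findK]
    by_cases hgap : y.2 - prev.2 ≤ threshold
    · rw [dif_pos ⟨hlt, by rw [hgety, hgetp]; exact hgap⟩]
      have happ : pre ++ prev :: y :: ys = (pre ++ [prev]) ++ y :: ys := by simp
      have := ih (pre ++ [prev]) y
      rw [happ]
      have hl : (pre ++ [prev]).length = pre.length + 1 := by simp
      rw [hl] at this
      rw [this]
      simp only [chop]
      rw [if_neg (by omega)]
      simp; omega
    · rw [dif_neg (by rw [hgety, hgetp]; intro h; exact hgap h.2)]
      simp only [chop]
      rw [if_pos (by omega)]
      simp

theorem bLoop_canon (threshold : Int) :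
    ∀ (rest : List (String × Int)) (series : List (List (String × Int))),
      bLoop threshold rest series = series ++ canon threshold rest := by
  intro rest series
  fun_induction bLoop with
  | case1 series => simp [canon]
  | case2 series x xs k ih =>
    have hk : k = 1 + (chop threshold x xs).1.length := by
      have := findK_chop threshold xs [] x
      simpa using this
    have hxs : (chop threshold x xs).1 ++ (chop threshold x xs).2 = xs := chop_append threshold x xs
    have htake : (x :: xs).take k = x :: (chop threshold x xs).1 := by
      have h1 : List.take (chop threshold x xs).1.length
          ((chop threshold x xs).1 ++ (chop threshold x xs).2) = (chop threshold x xs).1 :=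
        List.take_left
      rw [hxs] at h1
      rw [hk, Nat.add_comm 1, List.take_succ_cons, h1]
    have hdrop : (x :: xs).drop k = (chop threshold x xs).2 := by
      have h1 : List.drop (chop threshold x xs).1.length
          ((chop threshold x xs).1 ++ (chop threshold x xs).2) = (chop threshold x xs).2 :=
        List.drop_left
      rw [hxs] at h1
      rw [hk, Nat.add_comm 1, List.drop_succ_cons, h1]
    rw [ih, htake, hdrop]
    conv_rhs => rw [canon]
    simp

theorem b_eq_canon (cps_dirs : List (String × Int)) (threshold : Int) :
    group_into_series_alt cps_dirs threshold = canon threshold cps_dirs := by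
  unfold group_into_series_alt
  rw [bLoop_canon]
  simp

-- ===== VERDICT (by name: the statement is the Claim_ definition above) =====
theorem group_into_series_spec : Claim_equal_group_into_series := by
  intro cps_dirs threshold _
  unfold Spec_group_into_series
  rw [a_eq_canon, b_eq_canon]
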